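-- pv_equiv track=rewrite | github.com/shenxingy/Clade | orchestrator/worker_tldr.py | _extract_tldr_sections
-- ===== SOURCE A (Python) =====
-- def _extract_tldr_sections(tldr: str) -> dict[str, str]:
--     """Parse TLDR into a dict of {filepath: section_text}."""
--     sections: dict[str, str] = {}
--     current_file: str | None = None
--     current_lines: list[str] = []
--     for line in tldr.splitlines():
--         if line.startswith("## "):
--             if current_file is not None:
--                 sections[current_file] = "\n".join(current_lines)
--             current_file = line[3:].strip()
--             current_lines = [line]
--         elif current_file is not None:
--             current_lines.append(line)
--     if current_file is not None:
--         sections[current_file] = "\n".join(current_lines)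
--     return sections
-- ===== SOURCE B (Python) =====
-- def _extract_tldr_sections(tldr: str) -> dict[str, str]:
--     """Parse TLDR into a dict of {filepath: section_text}."""
--     lines = tldr.splitlines()
--     idxs = [i for i, line in enumerate(lines) if line.startswith("## ")]
--     idxs.append(len(lines))
--     sections: dict[str, str] = {}
--     for i, j in zip(idxs, idxs[1:]):
--         sections[lines[i][3:].strip()] = "\n".join(lines[i:j])
--     return sections
-- ===== Notes on version B (the rewrite author's own statement) =====
-- stated objective: alternative
-- what changed: Replaces the single-pass accumulator/flush state machine (current_file/current_lines with a final flush) by a two-phase locate-then-slice decomposition: collect header line indices plus a sentinel, then build each section by slicing between consecutive header indices.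
import Mathlib
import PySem

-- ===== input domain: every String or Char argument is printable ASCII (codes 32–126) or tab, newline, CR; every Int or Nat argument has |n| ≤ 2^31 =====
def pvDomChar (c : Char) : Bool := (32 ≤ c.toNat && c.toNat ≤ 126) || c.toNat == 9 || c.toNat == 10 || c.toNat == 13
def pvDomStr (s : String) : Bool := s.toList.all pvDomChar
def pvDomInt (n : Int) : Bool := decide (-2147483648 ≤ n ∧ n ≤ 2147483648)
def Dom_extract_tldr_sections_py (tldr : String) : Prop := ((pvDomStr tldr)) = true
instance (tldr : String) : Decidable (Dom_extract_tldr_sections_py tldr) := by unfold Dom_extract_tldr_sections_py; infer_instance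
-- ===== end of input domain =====

-- B replaces A's accumulator/flush state machine by a locate-header-indices-then-slice decomposition (alternative, same cost).

-- ===== PORT A =====
-- one loop iteration of A: state (sections, current_file, current_lines)
def aStep (st : PySem.Dict String String × Option String × List String) (line : String) :
    PySem.Dict String String × Option String × List String :=
  if PySem.Str.startswith line "## " then
    let sections :=
      match st.2.1 with
      | some f => st.1.insert f (PySem.Str.join "\n" st.2.2)
      | none => st.1
    (sections, some (PySem.Str.strip (PySem.Str.slice line (some 3) none)), [line])
  else
    match st.2.1 with
    | some _ => (st.1, st.2.1, st.2.2 ++ [line])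
    | none => st

def extract_tldr_sections_py (tldr : String) : List (String × String) :=
  let r := (PySem.Str.splitlines tldr).foldl aStep (PySem.Dict.empty, none, [])
  (match r.2.1 with
   | some f => r.1.insert f (PySem.Str.join "\n" r.2.2)
   | none => r.1).items

-- ===== PORT B =====
-- one iteration of B's pair loop: sections[lines[i][3:].strip()] = "\n".join(lines[i:j])
def bStep (lines : List String) (d : PySem.Dict String String) (ij : Int × Int) :
    PySem.Dict String String :=
  d.insert (PySem.Str.strip (PySem.Str.slice (PySem.List.pyGetD lines ij.1 "") (some 3) none))
    (PySem.Str.join "\n" (PySem.List.slice lines (some ij.1) (some ij.2)))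

def extract_tldr_sections_py_alt (tldr : String) : List (String × String) :=
  let lines := PySem.Str.splitlines tldr
  let idxs := ((PySem.List.enumerate lines 0).filter
      (fun p => PySem.Str.startswith p.2 "## ")).map (·.1) ++ [(lines.length : Int)]
  ((idxs.zip idxs.tail).foldl (bStep lines) PySem.Dict.empty).items

-- ===== PRECONDITION & SPEC =====
def Spec_extract_tldr_sections_py (tldr : String) (out : List (String × String)) : Prop := out = extract_tldr_sections_py_alt tldr
instance (tldr : String) (out : List (String × String)) : Decidable (Spec_extract_tldr_sections_py tldr out) := by unfold Spec_extract_tldr_sections_py; infer_instance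

-- ===== CLAIM (what is proved, stated in full; the proofs are below) =====
def Claim_equal_extract_tldr_sections_py : Prop := ∀ (tldr : String), Dom_extract_tldr_sections_py tldr → Spec_extract_tldr_sections_py tldr (extract_tldr_sections_py tldr)

-- ===== LEMMAS AND PROOFS =====

-- abbreviations for the per-line operations (opaque to the equivalence argument)
def isHdr (l : String) : Bool := PySem.Str.startswith l "## "
def hdrKey (l : String) : String := PySem.Str.strip (PySem.Str.slice l (some 3) none)
def joinNL (ls : List String) : String := PySem.Str.join "\n" ls

-- canonical section decomposition of the line list: (header line, body lines) groups
def segs : List String → List (String × List String)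
  | [] => []
  | l :: rest =>
    if isHdr l then (l, rest.takeWhile (fun x => !isHdr x)) :: segs (rest.dropWhile (fun x => !isHdr x))
    else segs rest
termination_by ls => ls.length
decreasing_by
  · simp only [List.length_cons]
    exact Nat.lt_succ_of_le (List.length_dropWhile_le _ _)
  · simp

def insSeg (d : PySem.Dict String String) (s : String × List String) : PySem.Dict String String :=
  d.insert (hdrKey s.1) (joinNL (s.1 :: s.2))

theorem segs_dropWhile (ls : List String) :
    segs (ls.dropWhile (fun x => !isHdr x)) = segs ls := by
  induction ls with
  | nil => rfl
  | cons l rest ih =>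
    by_cases h : isHdr l = true
    · simp [List.dropWhile, h]
    · simp only [Bool.not_eq_true] at h
      simp [List.dropWhile, segs, h, ih]

-- ===== A-side characterisation: the flush loop folds insSeg over segs =====

theorem aLoop_some (lines : List String) :
    ∀ (d : PySem.Dict String String) (f : String) (cl : List String),
    (let r := lines.foldl aStep (d, some f, cl)
     match r.2.1 with
     | some g => r.1.insert g (joinNL r.2.2)
     | none => r.1)
    = (segs lines).foldl insSeg
        (d.insert f (joinNL (cl ++ lines.takeWhile (fun x => !isHdr x)))) := by
  induction lines with
  | nil => intro d f cl; simp [segs, joinNL]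
  | cons l rest ih =>
    intro d f cl
    by_cases h : isHdr l = true
    · have hstep : aStep (d, some f, cl) l =
        (d.insert f (PySem.Str.join "\n" cl), some (hdrKey l), [l]) := by
        simp [aStep, isHdr] at h ⊢; simp [h, hdrKey]
      simp only [List.foldl_cons, hstep]
      rw [ih]
      have hsegs : segs (l :: rest) =
          (l, rest.takeWhile (fun x => !isHdr x)) :: segs (rest.dropWhile (fun x => !isHdr x)) := by
        simp [segs, h]
      rw [show (l :: rest).takeWhile (fun x => !isHdr x) = [] by simp [List.takeWhile, h],
        hsegs, segs_dropWhile]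
      simp [insSeg, joinNL]
    · simp only [Bool.not_eq_true] at h
      have hstep : aStep (d, some f, cl) l = (d, some f, cl ++ [l]) := by
        simp [aStep, isHdr] at h ⊢; simp [h]
      simp only [List.foldl_cons, hstep]
      rw [ih]
      have hsegs : segs (l :: rest) = segs rest := by simp [segs, h]
      simp [hsegs, List.takeWhile, h]

theorem aLoop_none (lines : List String) :
    ∀ (d : PySem.Dict String String),
    (let r := lines.foldl aStep (d, none, [])
     match r.2.1 with
     | some g => r.1.insert g (joinNL r.2.2)
     | none => r.1)
    = (segs lines).foldl insSeg d := by
  induction lines with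
  | nil => intro d; simp [segs]
  | cons l rest ih =>
    intro d
    by_cases h : isHdr l = true
    · have hstep : aStep (d, none, []) l = (d, some (hdrKey l), [l]) := by
        simp [aStep, isHdr] at h ⊢; simp [h, hdrKey]
      simp only [List.foldl_cons, hstep]
      rw [aLoop_some]
      have hsegs : segs (l :: rest) =
          (l, rest.takeWhile (fun x => !isHdr x)) :: segs (rest.dropWhile (fun x => !isHdr x)) := by
        simp [segs, h]
      rw [hsegs, segs_dropWhile]
      simp [insSeg, joinNL]
    · simp only [Bool.not_eq_true] at h
      have hstep : aStep (d, none, []) l = (d, none, []) := by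
        simp [aStep, isHdr] at h ⊢; simp [h]
      simp only [List.foldl_cons, hstep]
      rw [ih]
      have hsegs : segs (l :: rest) = segs rest := by simp [segs, h]
      rw [hsegs]

-- ===== B-side characterisation =====

-- header indices, structurally
def natHdrIdxs : List String → List Nat
  | [] => []
  | l :: rest => (if isHdr l then [0] else []) ++ (natHdrIdxs rest).map (· + 1)

theorem enumerate_shift {α : Type} (ls : List α) : ∀ (s : Int),
    PySem.List.enumerate ls (s + 1) = (PySem.List.enumerate ls s).map (fun p => (p.1 + 1, p.2)) := by
  induction ls with
  | nil => intro s; simp [PySem.List.enumerate_nil]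
  | cons l rest ih =>
    intro s
    rw [PySem.List.enumerate_cons, PySem.List.enumerate_cons]
    simp only [List.map_cons]
    rw [show s + 1 + 1 = (s + 1) + 1 by ring, ih (s + 1)]

theorem cast_map_comm (xs : List Nat) :
    (xs.map (fun n : Nat => (n : Int))).map (fun i : Int => i + 1)
      = (xs.map (fun n : Nat => n + 1)).map (fun n : Nat => (n : Int)) := by
  induction xs with
  | nil => rfl
  | cons x xs ih => simp only [List.map_cons, ih]; push_cast; simp

theorem hdrIdxs_eq (ls : List String) :
    ((PySem.List.enumerate ls 0).filter (fun p => PySem.Str.startswith p.2 "## ")).map (·.1)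
      = (natHdrIdxs ls).map (fun n : Nat => (n : Int)) := by
  induction ls with
  | nil => simp [PySem.List.enumerate_nil, natHdrIdxs]
  | cons l rest ih =>
    rw [PySem.List.enumerate_cons, enumerate_shift]
    have hshift : (((PySem.List.enumerate rest 0).map (fun p => (p.1 + 1, p.2))).filter
        (fun p => PySem.Str.startswith p.2 "## ")).map (·.1)
        = (((PySem.List.enumerate rest 0).filter (fun p => PySem.Str.startswith p.2 "## ")).map (·.1)).map (fun i : Int => i + 1) := by
      rw [List.filter_map, List.map_map, List.map_map]
      rfl
    by_cases h : PySem.Str.startswith l "## " = true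
    · simp only [List.filter_cons, h, if_pos, List.map_cons, hshift, ih, natHdrIdxs, isHdr,
        List.singleton_append, cast_map_comm, Nat.cast_zero]
    · rw [Bool.not_eq_true] at h
      simp only [List.filter_cons, h, Bool.false_eq_true, if_false, hshift, ih, natHdrIdxs, isHdr,
        List.nil_append, cast_map_comm]

-- B's pair loop, driven by nat indices
def bFoldN (lines : List String) (nidxs : List Nat) (d : PySem.Dict String String) :
    PySem.Dict String String :=
  (((nidxs.map (fun n : Nat => (n : Int))).zip (nidxs.map (fun n : Nat => (n : Int))).tail).foldl (bStep lines) d)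

theorem bStep_shift (l : String) (rest : List String) (d : PySem.Dict String String) (i j : Nat) :
    bStep (l :: rest) d (((i + 1 : Nat) : Int), ((j + 1 : Nat) : Int)) = bStep rest d ((i : Int), (j : Int)) := by
  simp only [bStep, PySem.List.pyGetD_natCast, PySem.List.slice_natCast]
  congr 2
  all_goals simp [Nat.succ_sub_succ]

theorem bFoldN_shift (l : String) (rest : List String) (nidxs : List Nat) (d : PySem.Dict String String) :
    bFoldN (l :: rest) (nidxs.map (fun n : Nat => n + 1)) d = bFoldN rest nidxs d := by
  unfold bFoldN
  rw [List.map_map, ← List.map_tail, List.zip_map, List.foldl_map, ← List.map_tail, List.zip_map, List.foldl_map]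
  have hfun : (fun (d : PySem.Dict String String) (p : Nat × Nat) =>
      bStep (l :: rest) d (Prod.map (fun n : Nat => ((n : Int))) (fun n : Nat => ((n : Int)))
        (Prod.map (fun n : Nat => n + 1) (fun n : Nat => n + 1) p)))
      = (fun (d : PySem.Dict String String) (p : Nat × Nat) =>
      bStep rest d (Prod.map (fun n : Nat => ((n : Int))) (fun n : Nat => ((n : Int))) p)) := by
    funext d p
    exact bStep_shift l rest d p.1 p.2
  exact congrArg (fun f => List.foldl f d (nidxs.zip nidxs.tail)) hfun

theorem take_headD_eq_takeWhile (ls : List String) :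
    ls.take ((natHdrIdxs ls).headD ls.length) = ls.takeWhile (fun x => !isHdr x) := by
  induction ls with
  | nil => simp
  | cons l rest ih =>
    by_cases h : isHdr l = true
    · simp [natHdrIdxs, h, List.takeWhile]
    · rw [Bool.not_eq_true] at h
      simp only [natHdrIdxs, h, Bool.false_eq_true, if_false, List.nil_append, List.takeWhile_cons,
        Bool.not_false, List.length_cons]
      cases hX : natHdrIdxs rest with
      | nil =>
        rw [hX] at ih
        simp only [List.headD_nil] at ih ⊢
        simp [List.take_succ_cons, ih, h]
      | cons n ns =>
        rw [hX] at ih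
        simp only [List.headD_cons] at ih ⊢
        simp [List.take_succ_cons, ih, h]

theorem bFoldN_eq_segs (ls : List String) :
    ∀ d, bFoldN ls (natHdrIdxs ls ++ [ls.length]) d = (segs ls).foldl insSeg d := by
  induction ls with
  | nil => intro d; simp [bFoldN, segs, natHdrIdxs]
  | cons l rest ih =>
    intro d
    by_cases h : isHdr l = true
    · have hidx : natHdrIdxs (l :: rest) ++ [(l :: rest).length]
          = 0 :: (natHdrIdxs rest ++ [rest.length]).map (fun n : Nat => n + 1) := by
        simp [natHdrIdxs, h, List.map_append]
      obtain ⟨x0, X', hX⟩ : ∃ x0 X', natHdrIdxs rest ++ [rest.length] = x0 :: X' := by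
        cases hnr : natHdrIdxs rest with
        | nil => exact ⟨rest.length, [], rfl⟩
        | cons a as => exact ⟨a, as ++ [rest.length], rfl⟩
      have hx0 : x0 = (natHdrIdxs rest).headD rest.length := by
        cases hnr : natHdrIdxs rest <;> rw [hnr] at hX <;> simp only [List.nil_append,
          List.cons_append, List.cons.injEq] at hX
        · exact hX.1.symm
        · simp [hX.1]
      have step1 : bFoldN (l :: rest) (0 :: (natHdrIdxs rest ++ [rest.length]).map (fun n : Nat => n + 1)) d
          = bFoldN (l :: rest) ((natHdrIdxs rest ++ [rest.length]).map (fun n : Nat => n + 1))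
              (bStep (l :: rest) d ((((0 : Nat)) : Int), (((x0 + 1 : Nat)) : Int))) := by
        rw [hX]; rfl
      have hb : bStep (l :: rest) d ((((0 : Nat)) : Int), ((x0 + 1 : Nat) : Int))
          = insSeg d (l, rest.takeWhile (fun x => !isHdr x)) := by
        simp only [bStep, PySem.List.pyGetD_natCast, PySem.List.slice_natCast, insSeg, hdrKey, joinNL]
        rw [hx0]
        simp [List.take_succ_cons, ← List.headD_eq_head?_getD, take_headD_eq_takeWhile]
      rw [hidx, step1, bFoldN_shift, ih, hb]
      have hsegs : segs (l :: rest) = (l, rest.takeWhile (fun x => !isHdr x)) :: segs (rest.dropWhile (fun x => !isHdr x)) := by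
        simp [segs, h]
      rw [hsegs, List.foldl_cons, segs_dropWhile]
    · rw [Bool.not_eq_true] at h
      have hidx : natHdrIdxs (l :: rest) ++ [(l :: rest).length]
          = (natHdrIdxs rest ++ [rest.length]).map (fun n : Nat => n + 1) := by
        simp [natHdrIdxs, h, List.map_append]
      rw [hidx, bFoldN_shift, ih]
      have hsegs : segs (l :: rest) = segs rest := by simp [segs, h]
      rw [hsegs]

-- ===== VERDICT (by name: the statement is the Claim_ definition above) =====
theorem extract_tldr_sections_py_spec : Claim_equal_extract_tldr_sections_py := by
  intro tldr _
  unfold Spec_extract_tldr_sections_py extract_tldr_sections_py extract_tldr_sections_py_alt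
  simp only
  rw [hdrIdxs_eq]
  have hA := aLoop_none (PySem.Str.splitlines tldr) PySem.Dict.empty
  simp only [joinNL] at hA
  rw [hA]
  have hB := bFoldN_eq_segs (PySem.Str.splitlines tldr) PySem.Dict.empty
  rw [← hB]
  unfold bFoldN
  rw [List.map_append]
  simp
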